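-- pv_equiv track=rewrite | github.com/Kim-Dong-Jun99/Algorithm | 프로그래머스/lv1/12918. 문자열 다루기 기본/문자열 다루기 기본.py | solution
-- ===== SOURCE A (Python) =====
-- def solution(s):
--     for i in range(65,91):
--         a = chr(i)
--         if a in s:
--             return False
--         b = chr(i+32)
--         if b in s:
--             return False
--     if 4 == len(s) or len(s) == 6:
--         return True
--     return False
-- ===== SOURCE B (Python) =====
-- def solution(s):
--     for c in s:
--         if 'A' <= c <= 'Z' or 'a' <= c <= 'z':
--             return False
--     return len(s) in (4, 6)
-- ===== Notes on version B (the rewrite author's own statement) =====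
-- stated objective: simpler
-- what changed: B makes a single pass over the characters of s, rejecting on the first ASCII letter found by range comparison, instead of A's 26 substring scans of s (one per alphabet position, upper and lower case), then checks the length membership directly.
import Mathlib
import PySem

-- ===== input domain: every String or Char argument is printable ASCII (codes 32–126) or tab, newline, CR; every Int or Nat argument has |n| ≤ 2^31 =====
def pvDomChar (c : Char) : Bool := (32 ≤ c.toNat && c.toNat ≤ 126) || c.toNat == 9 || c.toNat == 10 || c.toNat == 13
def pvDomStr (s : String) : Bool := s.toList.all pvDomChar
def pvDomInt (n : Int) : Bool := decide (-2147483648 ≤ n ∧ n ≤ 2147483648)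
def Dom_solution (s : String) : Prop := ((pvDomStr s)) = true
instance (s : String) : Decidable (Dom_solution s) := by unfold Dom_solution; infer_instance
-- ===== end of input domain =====

-- B replaces A's 26 substring scans of s (one per alphabet pair, upper and lower case)
-- with a single pass over the characters of s testing each by range comparison; same return value.

-- ===== PORT A =====
-- the body of A's for-loop over range(65, 91), then the length check reached after the loop
def solutionLoop (l : List Int) (s : String) : Bool :=
  match l with
  | [] => if 4 = PySem.Str.len s ∨ PySem.Str.len s = 6 then true else false
  | i :: rest =>
    let a := String.ofList [Char.ofNat i.toNat]          -- chr(i)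
    if PySem.Str.isIn a s then false
    else
      let b := String.ofList [Char.ofNat (i + 32).toNat] -- chr(i+32)
      if PySem.Str.isIn b s then false
      else solutionLoop rest s

def solution (s : String) : Bool :=
  solutionLoop (PySem.List.pyRange 65 91 1) s

-- ===== PORT B =====
def solution_alt (s : String) : Bool :=
  if s.toList.any (fun c => ('A' ≤ c && c ≤ 'Z') || ('a' ≤ c && c ≤ 'z')) then false
  else PySem.Str.len s = 4 ∨ PySem.Str.len s = 6

-- ===== PRECONDITION & SPEC =====
def Spec_solution (s : String) (out : Bool) : Prop := out = solution_alt s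
instance (s : String) (out : Bool) : Decidable (Spec_solution s out) := by unfold Spec_solution; infer_instance

-- ===== CLAIM (what is proved, stated in full; the proofs are below) =====
def Claim_equal_solution : Prop := ∀ (s : String), Dom_solution s → Spec_solution s (solution s)

-- ===== LEMMAS AND PROOFS =====

-- single-character Python 'in': "c" in s ↔ the char c occurs in s
theorem isIn_singleton_iff (c : Char) (s : String) :
    PySem.Str.isIn (String.ofList [c]) s = true ↔ c ∈ s.toList := by
  rw [PySem.Str.isIn_iff_infix]
  simpa using List.singleton_infix_iff c s.toList

-- the loop returns the length check guarded by "no letter named by the remaining range occurs in s"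
theorem solutionLoop_eq (l : List Int) (s : String) :
    solutionLoop l s =
      (!(l.any (fun i => PySem.Str.isIn (String.ofList [Char.ofNat i.toNat]) s
                      || PySem.Str.isIn (String.ofList [Char.ofNat (i + 32).toNat]) s))
       && decide (4 = PySem.Str.len s ∨ PySem.Str.len s = 6)) := by
  induction l with
  | nil => simp [solutionLoop]
  | cons i rest ih =>
      simp only [PySem.Str.isIn_eq] at ih ⊢
      simp only [solutionLoop, List.any_cons, PySem.Str.isIn_eq]
      rw [ih]
      simp only [String.toList_ofList]
      cases hA : PySem.Chars.isIn [Char.ofNat i.toNat] s.toList <;>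
        by_cases hB : PySem.Chars.isIn [Char.ofNat (i + 32).toNat] s.toList = true <;>
          simp [hA, hB, Bool.and_assoc]

-- the two "a letter occurs" tests agree:
-- some alphabet position's upper- or lower-case char occurs in s ↔ some char of s is an ASCII letter
theorem any_range_eq_any_chars (s : String) :
    ((PySem.List.pyRange 65 91 1).any
        (fun i => PySem.Str.isIn (String.ofList [Char.ofNat i.toNat]) s
               || PySem.Str.isIn (String.ofList [Char.ofNat (i + 32).toNat]) s)) =
      s.toList.any (fun c => ('A' ≤ c && c ≤ 'Z') || ('a' ≤ c && c ≤ 'z')) := by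
  rcases haux : s.toList.any (fun c => ('A' ≤ c && c ≤ 'Z') || ('a' ≤ c && c ≤ 'z')) with _ | _
  · -- no ASCII letter in s: every range test fails
    simp only [List.any_eq_false] at haux ⊢
    intro i hi
    rw [PySem.List.mem_pyRange_one] at hi
    obtain ⟨h65, h91⟩ := hi
    simp only [Bool.or_eq_true, not_or]
    constructor
    · intro h
      rw [isIn_singleton_iff] at h
      refine absurd ?_ (haux _ h)
      interval_cases i <;> decide
    · intro h
      rw [isIn_singleton_iff] at h
      refine absurd ?_ (haux _ h)
      interval_cases i <;> decide
  · -- some char c of s is an ASCII letter: the matching alphabet position hits s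
    simp only [List.any_eq_true] at haux ⊢
    obtain ⟨c, hc, hlet⟩ := haux
    simp only [Bool.or_eq_true, Bool.and_eq_true, decide_eq_true_eq] at hlet
    have hA : ('A').toNat = 65 := rfl
    have hZ : ('Z').toNat = 90 := rfl
    have ha : ('a').toNat = 97 := rfl
    have hz : ('z').toNat = 122 := rfl
    rcases hlet with ⟨h1, h2⟩ | ⟨h1, h2⟩
    · have h1' : (65 : Nat) ≤ c.toNat := Char.le_def.mp h1
      have h2' : c.toNat ≤ (90 : Nat) := Char.le_def.mp h2
      refine ⟨(c.toNat : Int), ?_, ?_⟩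
      · rw [PySem.List.mem_pyRange_one]; omega
      · simp only [Bool.or_eq_true]
        left
        rw [isIn_singleton_iff]
        simpa [Char.ofNat_toNat] using hc
    · have h1' : (97 : Nat) ≤ c.toNat := Char.le_def.mp h1
      have h2' : c.toNat ≤ (122 : Nat) := Char.le_def.mp h2
      refine ⟨(c.toNat : Int) - 32, ?_, ?_⟩
      · rw [PySem.List.mem_pyRange_one]; omega
      · simp only [Bool.or_eq_true]
        right
        rw [isIn_singleton_iff]
        have ht : ((c.toNat : Int) - 32 + 32).toNat = c.toNat := by omega
        rw [ht, Char.ofNat_toNat]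
        exact hc

-- ===== VERDICT (by name: the statement is the Claim_ definition above) =====
theorem solution_spec : Claim_equal_solution := by
  intro s _
  unfold Spec_solution solution solution_alt
  rw [solutionLoop_eq, any_range_eq_any_chars]
  cases h : s.toList.any (fun c => ('A' ≤ c && c ≤ 'Z') || ('a' ≤ c && c ≤ 'z'))
  · rw [if_neg (by simp)]
    simp only [Bool.not_false, Bool.true_and]
    rw [decide_eq_decide]; omega
  · simp
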